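-- pv_equiv track=rewrite | github.com/ch4og/russia-team-2020-main-russian | H.py | check
-- ===== SOURCE A (Python) =====
-- def check(mama):
-- 	st = str(mama)
-- 	uniq = list((set(st)))
-- 	uniq.sort()
-- 	maxChars = 0
--
-- 	for char in uniq:
-- 		a = st.count(char)
-- 		if a > maxChars:
-- 			maxChars = a
-- 			break
--
--
-- 	return maxChars
-- ===== SOURCE B (Python) =====
-- def check(mama):
--     st = str(mama)
--     return st.count(min(st))
-- ===== Notes on version B (the rewrite author's own statement) =====
-- stated objective: simpler
-- what changed: B replaces building a set, sorting it and breaking out of a loop on the first positive count with a direct min() over the string followed by one count; str(int) is never empty so no guard is needed.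
import Mathlib
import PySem

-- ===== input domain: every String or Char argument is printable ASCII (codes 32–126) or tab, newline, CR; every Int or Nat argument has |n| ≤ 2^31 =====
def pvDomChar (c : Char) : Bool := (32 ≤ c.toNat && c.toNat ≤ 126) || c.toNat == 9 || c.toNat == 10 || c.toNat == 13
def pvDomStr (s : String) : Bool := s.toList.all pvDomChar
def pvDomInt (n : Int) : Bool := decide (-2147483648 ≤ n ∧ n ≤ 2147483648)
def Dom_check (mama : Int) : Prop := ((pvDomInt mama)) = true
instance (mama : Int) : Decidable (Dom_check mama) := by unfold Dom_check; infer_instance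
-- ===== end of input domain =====

-- B computes str(mama).count(min(str(mama))) directly instead of sorting the set of characters
-- and breaking out of a loop on the first positive count; same value, simpler (objective: simpler).


-- ===== PORT A =====
-- the loop 'for char in uniq: a = st.count(char); if a > maxChars: maxChars = a; break'
-- (st.count of a length-1 string is the character count, exact here)
def checkLoop (st : List Char) (maxChars : Int) : List Char → Int
  | [] => maxChars
  | c :: rest =>
      let a : Int := (PySem.List.count st c : Int)
      if a > maxChars then a else checkLoop st maxChars rest

def check (mama : Int) : Int :=
  let st := PySem.Int.toChars mama
  let uniq := PySem.List.sorted (PySem.Set.ofList st) (fun c => c) false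
  checkLoop st 0 uniq

-- ===== PORT B =====
def check_alt (mama : Int) : Int :=
  let st := PySem.Int.toChars mama
  match PySem.List.min? st (fun c => c) with
  | some m => (PySem.List.count st m : Int)
  | none => 0   -- unreachable: str(mama) is never empty

-- ===== PRECONDITION & SPEC =====
def Spec_check (mama : Int) (out : Int) : Prop := out = check_alt mama
instance (mama : Int) (out : Int) : Decidable (Spec_check mama out) := by unfold Spec_check; infer_instance

-- ===== CLAIM (what is proved, stated in full; the proofs are below) =====
def Claim_equal_check : Prop := ∀ (mama : Int), Dom_check mama → Spec_check mama (check mama)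

-- ===== LEMMAS AND PROOFS =====

theorem toChars_ne_nil (n : Int) : PySem.Int.toChars n ≠ [] := by
  unfold PySem.Int.toChars
  split
  · simp
  · have h : 0 < (Nat.toDigits 10 n.toNat).length := Nat.length_toDigits_pos
    intro hc
    rw [hc] at h
    simp at h

theorem check_main (st : List Char) (hne : st ≠ []) :
    checkLoop st 0 (PySem.List.sorted (PySem.Set.ofList st) (fun c => c) false) =
      (match PySem.List.min? st (fun c => c) with
       | some m => (PySem.List.count st m : Int)
       | none => 0) := by
  have hofne : PySem.Set.ofList st ≠ [] := by
    intro hc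
    cases h : st with
    | nil => exact hne h
    | cons x xs =>
      have hx : x ∈ PySem.Set.ofList st := by
        rw [PySem.Set.mem_ofList, h]; exact List.mem_cons_self
      rw [hc] at hx; simp at hx
  cases hL : PySem.List.sorted (PySem.Set.ofList st) (fun c => c) false with
  | nil => exact absurd ((PySem.List.sorted_eq_nil_iff _ _ _).mp hL) hofne
  | cons m t =>
    have hmmem : m ∈ st := by
      have hm : m ∈ PySem.List.sorted (PySem.Set.ofList st) (fun c => c) false := by
        rw [hL]; exact List.mem_cons_self
      exact (PySem.Set.mem_ofList _ _).mp ((PySem.List.mem_sorted _ _ _ _).mp hm)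
    have hcnt : ((PySem.List.count st m : Int) > 0) := by
      have h0 : 0 < List.count m st := List.count_pos_iff.mpr hmmem
      simp only [PySem.List.count_eq]
      omega
    -- A's loop fires on the very first character of the sorted unique list
    have hA : checkLoop st 0 (m :: t) = (PySem.List.count st m : Int) := by
      unfold checkLoop
      simp only [if_pos hcnt]
    rw [hA]
    -- m is the minimum character of st, so it is the value min() returns
    have hmin : ∀ y ∈ st, m ≤ y := by
      intro y hy
      exact PySem.List.key_head_sorted_le _ _ hL y ((PySem.Set.mem_ofList _ _).mpr hy)
    cases hm' : PySem.List.min? st (fun c => c) with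
    | none => exact absurd ((PySem.List.min?_eq_none_iff _ _).mp hm') hne
    | some m' =>
      have h1 : m' ∈ st := PySem.List.min?_mem hm'
      have heq : m = m' := le_antisymm (hmin m' h1) (PySem.List.min?_isMin hm' m hmmem)
      rw [heq]

-- ===== VERDICT (by name: the statement is the Claim_ definition above) =====
theorem check_spec : Claim_equal_check := by
  intro mama _
  show check mama = check_alt mama
  unfold check check_alt
  exact check_main _ (toChars_ne_nil mama)
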